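-- pv_equiv track=rewrite | github.com/brayanSmithPineda/General-Code | Data-Structures-Algorithms/Two Pointer Technique/Sliding Window/maximun sum subarray.py | maximun_sum_subarray
-- ===== SOURCE A (Python) =====
-- def maximun_sum_subarray(arr, size):
--     maximun_sum = sum(arr[:size])
--     window_sum = maximun_sum
--     start_index = 0
--     for i in range(size, len(arr)):
--         window_sum = window_sum + arr[i] - arr[i - size]
--         if window_sum > maximun_sum:
--             maximun_sum = window_sum
--             start_index = i - size + 1
--     return [maximun_sum, start_index, start_index + size - 1]
-- ===== SOURCE B (Python) =====
-- def maximun_sum_subarray(arr, size):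
--     prefix = [0]
--     for x in arr:
--         prefix.append(prefix[-1] + x)
--     n = len(arr)
--     max_sum = prefix[min(size, n)]
--     start = 0
--     for i in range(1, n - size + 1):
--         s = prefix[i + size] - prefix[i]
--         if s > max_sum:
--             max_sum = s
--             start = i
--     return [max_sum, start, start + size - 1]
-- ===== Notes on version B (the rewrite author's own statement) =====
-- stated objective: alternative
-- what changed: B builds a prefix-sum table once and evaluates each window as prefix[i+size]-prefix[i], replacing A's running window sum maintained by add/subtract updates; Pre_ excludes size < 0, on which A raises IndexError.
import Mathlib
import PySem

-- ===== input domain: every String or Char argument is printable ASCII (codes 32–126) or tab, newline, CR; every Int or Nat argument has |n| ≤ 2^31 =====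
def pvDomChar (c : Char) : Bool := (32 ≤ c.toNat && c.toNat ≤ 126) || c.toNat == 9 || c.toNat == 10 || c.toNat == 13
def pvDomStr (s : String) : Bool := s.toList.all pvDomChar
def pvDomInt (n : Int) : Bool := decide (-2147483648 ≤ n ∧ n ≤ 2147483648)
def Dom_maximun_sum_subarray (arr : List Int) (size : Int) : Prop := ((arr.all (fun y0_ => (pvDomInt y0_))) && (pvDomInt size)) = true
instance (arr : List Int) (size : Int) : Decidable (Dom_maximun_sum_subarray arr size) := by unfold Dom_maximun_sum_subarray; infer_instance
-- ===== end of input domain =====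

-- B replaces A's running window sum by a prefix-sum table queried per window (alternative decomposition, same cost).

-- ===== PORT A =====
-- loop body of A's for-loop: state = (window_sum, maximun_sum, start_index)
def pvStepA (arr : List Int) (size : Int) (st : Int × Int × Int) (i : Int) : Int × Int × Int :=
  let window_sum := st.1 + PySem.List.pyGetD arr i 0 - PySem.List.pyGetD arr (i - size) 0
  if window_sum > st.2.1 then (window_sum, window_sum, i - size + 1)
  else (window_sum, st.2.1, st.2.2)

def maximun_sum_subarray (arr : List Int) (size : Int) : List Int :=
  let maximun_sum := (PySem.List.slice arr none (some size)).sum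
  let st := (PySem.List.pyRange size (arr.length : Int) 1).foldl (pvStepA arr size)
              (maximun_sum, maximun_sum, 0)
  [st.2.1, st.2.2, st.2.2 + size - 1]

-- ===== PORT B =====
-- loop body of B's for-loop: state = (max_sum, start)
def pvStepB (prefix_ : List Int) (size : Int) (st : Int × Int) (i : Int) : Int × Int :=
  let s := PySem.List.pyGetD prefix_ (i + size) 0 - PySem.List.pyGetD prefix_ i 0
  if s > st.1 then (s, i) else st

def maximun_sum_subarray_alt (arr : List Int) (size : Int) : List Int :=
  let prefix_ := arr.foldl (fun p x => p ++ [PySem.List.pyGetD p (-1) 0 + x]) [(0 : Int)]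
  let n : Int := arr.length
  let max_sum := PySem.List.pyGetD prefix_ (min size n) 0
  let st := (PySem.List.pyRange 1 (n - size + 1) 1).foldl (pvStepB prefix_ size) (max_sum, 0)
  [st.1, st.2, st.2 + size - 1]

-- ===== PRECONDITION & SPEC =====
-- Pre_ excludes exactly size < 0, where A's arr[i - size] indexes past the end and A raises IndexError.
def Pre_maximun_sum_subarray (arr : List Int) (size : Int) : Prop := 0 ≤ size
instance (arr : List Int) (size : Int) : Decidable (Pre_maximun_sum_subarray arr size) := by unfold Pre_maximun_sum_subarray; infer_instance
def pvWitness_maximun_sum_subarray : List Int × Int := ([1, -2, 3, 4], 2)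

def Spec_maximun_sum_subarray (arr : List Int) (size : Int) (out : List Int) : Prop := out = maximun_sum_subarray_alt arr size
instance (arr : List Int) (size : Int) (out : List Int) : Decidable (Spec_maximun_sum_subarray arr size out) := by unfold Spec_maximun_sum_subarray; infer_instance

-- ===== CLAIM (what is proved, stated in full; the proofs are below) =====
def Claim_equal_maximun_sum_subarray : Prop := ∀ (arr : List Int) (size : Int), Dom_maximun_sum_subarray arr size → Pre_maximun_sum_subarray arr size → Spec_maximun_sum_subarray arr size (maximun_sum_subarray arr size)

-- ===== LEMMAS AND PROOFS =====

-- the prefix-sum value B's table holds at position t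
def pvPfx (arr : List Int) (t : Int) : Int := (arr.take t.toNat).sum

lemma pvPrefix_fold (arr : List Int) : ∀ (p : List Int) (c : Int),
    arr.foldl (fun p x => p ++ [PySem.List.pyGetD p (-1) 0 + x]) (p ++ [c])
      = p ++ (List.range (arr.length + 1)).map (fun t => c + (arr.take t).sum) := by
  induction arr with
  | nil => intro p c; simp
  | cons x arr ih =>
    intro p c
    simp only [List.foldl_cons, PySem.List.pyGetD_neg_one_append_singleton]
    rw [show p ++ [c] ++ [c + x] = (p ++ [c]) ++ [c + x] by simp]
    rw [ih (p ++ [c]) (c + x)]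
    simp only [List.length_cons, List.range_succ_eq_map, List.map_cons, List.map_map,
      Function.comp_def, List.take_zero, List.sum_nil, List.take_succ_cons, List.sum_cons,
      List.append_assoc, List.cons_append, List.nil_append, add_zero]
    simp [add_assoc]

lemma pvPrefix_eq (arr : List Int) :
    arr.foldl (fun p x => p ++ [PySem.List.pyGetD p (-1) 0 + x]) [(0 : Int)]
      = (List.range (arr.length + 1)).map (fun t => ((arr.take t).sum : Int)) := by
  have h := pvPrefix_fold arr [] 0
  simpa using h

lemma pvPrefix_get (arr : List Int) (j : Int) (h0 : 0 ≤ j) (h1 : j ≤ (arr.length : Int)) :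
    PySem.List.pyGetD ((List.range (arr.length + 1)).map (fun t => ((arr.take t).sum : Int))) j 0
      = pvPfx arr j := by
  rw [PySem.List.pyGetD_eq_getElem _ _ h0 (by simp; omega)]
  simp [pvPfx]

lemma pvPfx_step (arr : List Int) (t : Int) (h0 : 0 ≤ t) (h1 : t < (arr.length : Int)) :
    pvPfx arr (t + 1) = pvPfx arr t + PySem.List.pyGetD arr t 0 := by
  rw [PySem.List.pyGetD_eq_getElem _ _ h0 (by omega)]
  simp only [pvPfx]
  rw [show (t + 1).toNat = t.toNat + 1 by omega]
  exact List.sum_take_succ arr t.toNat (by omega)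

lemma pvLoop_eq (arr : List Int) (size : Int) (hs : 0 ≤ size) :
    ∀ (k : Nat) (j : Int), 1 ≤ j → j + k = (arr.length : Int) - size + 1 →
    ∀ (m st : Int),
      ((PySem.List.pyRange (j - 1 + size) (arr.length : Int) 1).foldl (pvStepA arr size)
          (pvPfx arr (j - 1 + size) - pvPfx arr (j - 1), m, st)).2
        = (PySem.List.pyRange j ((arr.length : Int) - size + 1) 1).foldl
            (pvStepB ((List.range (arr.length + 1)).map (fun t => ((arr.take t).sum : Int))) size)
            (m, st) := by
  intro k
  induction k with
  | zero =>
    intro j hj hk m st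
    rw [PySem.List.pyRange_one_eq_nil (by omega), PySem.List.pyRange_one_eq_nil (by omega)]
    simp
  | succ k ih =>
    intro j hj hk m st
    have hjn : j - 1 + size < (arr.length : Int) := by omega
    rw [PySem.List.pyRange_one_cons hjn, PySem.List.pyRange_one_cons (show j < (arr.length : Int) - size + 1 by omega)]
    simp only [List.foldl_cons]
    have hw : pvStepA arr size (pvPfx arr (j - 1 + size) - pvPfx arr (j - 1), m, st) (j - 1 + size)
        = (pvPfx arr (j + size) - pvPfx arr j,
           if pvPfx arr (j + size) - pvPfx arr j > m then pvPfx arr (j + size) - pvPfx arr j else m,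
           if pvPfx arr (j + size) - pvPfx arr j > m then j else st) := by
      simp only [pvStepA]
      have e1 : pvPfx arr (j - 1 + size) - pvPfx arr (j - 1)
            + PySem.List.pyGetD arr (j - 1 + size) 0 - PySem.List.pyGetD arr (j - 1 + size - size) 0
          = pvPfx arr (j + size) - pvPfx arr j := by
        have a1 := pvPfx_step arr (j - 1 + size) (by omega) (by omega)
        have a2 := pvPfx_step arr (j - 1) (by omega) (by omega)
        have e : j - 1 + size - size = j - 1 := by ring
        rw [e]
        rw [show j - 1 + size + 1 = j + size by ring] at a1
        rw [show j - 1 + 1 = j by ring] at a2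
        omega
      rw [e1]
      split_ifs with h
      · simp only [show j - 1 + size - size + 1 = j by ring]
      · simp
    rw [hw]
    have hB : pvStepB ((List.range (arr.length + 1)).map (fun t => ((arr.take t).sum : Int))) size (m, st) j
        = (if pvPfx arr (j + size) - pvPfx arr j > m then pvPfx arr (j + size) - pvPfx arr j else m,
           if pvPfx arr (j + size) - pvPfx arr j > m then j else st) := by
      simp only [pvStepB]
      rw [pvPrefix_get arr (j + size) (by omega) (by omega), pvPrefix_get arr j (by omega) (by omega)]
      split_ifs with h <;> simp
    rw [hB]
    have hih := ih (j + 1) (by omega) (by omega)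
      (if pvPfx arr (j + size) - pvPfx arr j > m then pvPfx arr (j + size) - pvPfx arr j else m)
      (if pvPfx arr (j + size) - pvPfx arr j > m then j else st)
    simp only [show j + 1 - 1 = j by ring] at hih
    rw [show j - 1 + size + 1 = j + size by ring]
    exact hih

-- ===== VERDICT (by name: the statement is the Claim_ definition above) =====
theorem maximun_sum_subarray_spec : Claim_equal_maximun_sum_subarray := by
  intro arr size _ hs
  unfold Spec_maximun_sum_subarray maximun_sum_subarray maximun_sum_subarray_alt
  simp only [pvPrefix_eq, PySem.List.slice_to _ hs]
  by_cases hle : size ≤ (arr.length : Int)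
  · rw [min_eq_left hle, pvPrefix_get arr size hs hle]
    have key := pvLoop_eq arr size hs ((arr.length : Int) - size).toNat 1 (by omega) (by omega)
      (pvPfx arr size) 0
    simp only [show (1 : Int) - 1 = 0 by ring,
      show pvPfx arr 0 = 0 by simp [pvPfx], sub_zero, zero_add] at key
    have hinit : (arr.take size.toNat).sum = pvPfx arr size := rfl
    rw [hinit, key]
  · rw [PySem.List.pyRange_one_eq_nil (by omega), PySem.List.pyRange_one_eq_nil (by omega),
      min_eq_right (le_of_not_ge hle), pvPrefix_get arr (arr.length : Int) (by omega) le_rfl]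
    have : (arr.take size.toNat).sum = pvPfx arr (arr.length : Int) := by
      simp [pvPfx, List.take_of_length_le (show arr.length ≤ size.toNat by omega)]
    simp [this]
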